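-- pv_equiv track=rewrite | github.com/atikulmunna/sagrag | app/graph.py | _extract_relations_fallback
-- ===== SOURCE A (Python) =====
-- def _extract_relations_fallback(text: str, entities: list):
--     relations = []
--     if not entities:
--         return relations
--     lowered = text.lower()
--     predicates = [" is ", " are ", " has ", " have ", " causes ", " leads to ", " supports "]
--     for pred in predicates:
--         if pred in lowered:
--             for i in range(len(entities)):
--                 for j in range(len(entities)):
--                     if i == j:
--                         continue
--                     a = entities[i]
--                     b = entities[j]
--                     if a.lower() in lowered and b.lower() in lowered:
--                         relations.append((a, pred.strip(), b))
--             break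
--     return relations
-- ===== SOURCE B (Python) =====
-- def _extract_relations_fallback(text: str, entities: list):
--     lowered = text.lower()
--     predicates = [" is ", " are ", " has ", " have ", " causes ", " leads to ", " supports "]
--     pred = next((p for p in predicates if p in lowered), None)
--     if pred is None:
--         return []
--     # presence of each entity tested once, not per pair
--     present = [e for e in entities if e.lower() in lowered]
--     rel = pred.strip()
--     out = []
--     for k in range(len(present)):
--         a = present[k]
--         for b in present[:k] + present[k + 1:]:
--             out.append((a, rel, b))
--     return out
-- ===== Notes on version B (the rewrite author's own statement) =====
-- stated objective: alternative
-- what changed: B finds the first matching predicate once, computes each entity's lowercase substring-presence in the text once to build a filtered 'present' list, and emits all ordered pairs of distinct positions of that list, instead of A's triple-nested loop that re-tests both entities' presence in the text for every (i, j) pair.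
import Mathlib
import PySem

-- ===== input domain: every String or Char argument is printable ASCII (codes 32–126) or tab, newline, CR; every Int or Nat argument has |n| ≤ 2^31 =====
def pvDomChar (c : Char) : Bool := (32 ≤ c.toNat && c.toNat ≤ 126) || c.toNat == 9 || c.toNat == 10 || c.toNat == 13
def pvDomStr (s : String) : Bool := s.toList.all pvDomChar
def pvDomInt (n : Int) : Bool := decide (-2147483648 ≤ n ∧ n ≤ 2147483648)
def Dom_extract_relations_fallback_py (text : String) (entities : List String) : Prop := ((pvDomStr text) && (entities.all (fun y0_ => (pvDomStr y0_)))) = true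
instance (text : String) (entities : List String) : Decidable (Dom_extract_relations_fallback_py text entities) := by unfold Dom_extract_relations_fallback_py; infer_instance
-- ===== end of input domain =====

-- B tests each entity's substring-presence once and pairs the positions of the filtered
-- 'present' list, instead of A's per-pair presence tests (objective: alternative).

-- ===== PORT A =====
-- the predicate list A builds
def pvPredicates : List String := [" is ", " are ", " has ", " have ", " causes ", " leads to ", " supports "]

-- the 'for i / for j' double loop A runs for the first matching predicate p
def pvPairsA (lowered : String) (entities : List String) (p : String) : List (String × String × String) :=
  (PySem.List.pyRange 0 (PySem.List.len entities) 1).foldl (fun relations i =>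
    (PySem.List.pyRange 0 (PySem.List.len entities) 1).foldl (fun relations j =>
      if i = j then relations
      else
        if PySem.Str.isIn (PySem.Str.lower (PySem.List.pyGetD entities i "")) lowered
            && PySem.Str.isIn (PySem.Str.lower (PySem.List.pyGetD entities j "")) lowered then
          relations ++ [(PySem.List.pyGetD entities i "", PySem.Str.strip p, PySem.List.pyGetD entities j "")]
        else relations) relations) []

-- 'for pred in predicates: if pred in lowered: <double loop>; break'
def pvPredLoopA (lowered : String) (entities : List String) : List String → List (String × String × String)
  | [] => []
  | p :: ps => if PySem.Str.isIn p lowered then pvPairsA lowered entities p else pvPredLoopA lowered entities ps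

def extract_relations_fallback_py (text : String) (entities : List String) : List (String × String × String) :=
  if entities = [] then []
  else pvPredLoopA (PySem.Str.lower text) entities pvPredicates


-- ===== PORT B =====
def extract_relations_fallback_py_alt (text : String) (entities : List String) : List (String × String × String) :=
  let lowered := PySem.Str.lower text
  match pvPredicates.find? (fun p => PySem.Str.isIn p lowered) with
  | none => []
  | some pred =>
    let present := entities.filter (fun e => PySem.Str.isIn (PySem.Str.lower e) lowered)
    let rel := PySem.Str.strip pred
    (PySem.List.pyRange 0 (PySem.List.len present) 1).foldl (fun out k =>
      (PySem.List.slice present none (some k) ++ PySem.List.slice present (some (k + 1)) none).foldl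
        (fun out b => out ++ [(PySem.List.pyGetD present k "", rel, b)]) out) []

-- ===== PRECONDITION & SPEC =====
def Spec_extract_relations_fallback_py (text : String) (entities : List String) (out : List (String × String × String)) : Prop := out = extract_relations_fallback_py_alt text entities
instance (text : String) (entities : List String) (out : List (String × String × String)) : Decidable (Spec_extract_relations_fallback_py text entities out) := by unfold Spec_extract_relations_fallback_py; infer_instance

-- ===== CLAIM (what is proved, stated in full; the proofs are below) =====
def Claim_equal_extract_relations_fallback_py : Prop := ∀ (text : String) (entities : List String), Dom_extract_relations_fallback_py text entities → Spec_extract_relations_fallback_py text entities (extract_relations_fallback_py text entities)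

-- ===== LEMMAS AND PROOFS =====

-- '[f(l[j]) for j in range(len(l)) if q(l[j])]' = map f over the filtered list
theorem pvFilterRange {α γ : Type} (q : α → Bool) (f : α → γ) (d : α) (l : List α) :
    ((List.range l.length).filter (fun j => q (l.getD j d))).map (fun j => f (l.getD j d))
      = (l.filter q).map f := by
  induction l with
  | nil => rfl
  | cons x xs ih =>
    rw [List.length_cons, List.range_succ_eq_map, List.filter_cons, List.filter_map]
    by_cases hx : q x <;>
      · simp [hx, Function.comp_def]
        simpa using ih

theorem pvInner {α γ : Type} (q : α → Bool) (f : α → γ) (d : α) (l : List α) (i : Nat) :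
    ((List.range l.length).filter (fun j => !decide (i = j) && q (l.getD j d))).map (fun j => f (l.getD j d))
      = ((l.eraseIdx i).filter q).map f := by
  induction l generalizing i with
  | nil => rfl
  | cons x xs ih =>
    rw [List.length_cons, List.range_succ_eq_map, List.filter_cons, List.filter_map]
    cases i with
    | zero =>
      simp [Function.comp_def]
      simpa using pvFilterRange q f d xs
    | succ i' =>
      rw [List.eraseIdx_cons_succ, List.filter_cons]
      by_cases hx : q x <;>
      · simp [hx, Function.comp_def]
        simpa using ih i'

theorem pvCore {α γ : Type} (q : α → Bool) (d : α) :
    ∀ (l : List α) (f : α → List α → List γ),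
    (List.range l.length).flatMap
        (fun i => if q (l.getD i d) then f (l.getD i d) ((l.eraseIdx i).filter q) else [])
      = (List.range (l.filter q).length).flatMap
          (fun k => f ((l.filter q).getD k d) ((l.filter q).eraseIdx k)) := by
  intro l
  induction l with
  | nil => intro f; rfl
  | cons x xs ih =>
    intro f
    rw [List.length_cons, List.range_succ_eq_map, List.flatMap_cons, List.flatMap_map, List.filter_cons]
    by_cases hx : q x
    · simp only [hx, List.getD_cons_zero, if_pos, List.eraseIdx_zero, List.tail_cons,
        List.getD_cons_succ, List.eraseIdx_cons_succ, List.filter_cons,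
        List.length_cons]
      rw [List.range_succ_eq_map, List.flatMap_cons, List.flatMap_map]
      simp only [List.getD_cons_zero, List.eraseIdx_zero, List.tail_cons,
        List.getD_cons_succ, List.eraseIdx_cons_succ]
      have := ih (fun a m => f a (x :: m))
      simp only at this
      rw [← this]
    · simp only [hx, Bool.false_eq_true, if_false, List.nil_append, List.getD_cons_zero]
      simp only [List.getD_cons_succ, List.eraseIdx_cons_succ, List.filter_cons]
      rw [← ih f]
      simp [hx]

-- A's predicate loop with break = find? of the first matching predicate
theorem pvPredLoop_eq_find (lowered : String) (entities : List String) (ps : List String) :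
    pvPredLoopA lowered entities ps =
      match ps.find? (fun p => PySem.Str.isIn p lowered) with
      | none => []
      | some p => pvPairsA lowered entities p := by
  induction ps with
  | nil => rfl
  | cons p ps ih =>
    rw [pvPredLoopA, List.find?_cons]
    cases h : PySem.Str.isIn p lowered
    · simpa using ih
    · simp

-- A's double loop reduced to the pvCore left-hand side
theorem pvPairsA_eq (lowered : String) (entities : List String) (p : String) :
    pvPairsA lowered entities p =
      (List.range entities.length).flatMap
        (fun i => if PySem.Str.isIn (PySem.Str.lower (entities.getD i "")) lowered then
          (((entities.eraseIdx i).filter (fun e => PySem.Str.isIn (PySem.Str.lower e) lowered)).map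
            (fun b => (entities.getD i "", PySem.Str.strip p, b))) else []) := by
  unfold pvPairsA
  simp only [PySem.List.len_eq, PySem.List.pyRange_zero_natCast, List.foldl_map,
    PySem.List.pyGetD_natCast, Nat.cast_inj]
  have hfun2 : (fun (relations : List (String × String × String)) (i : Nat) =>
      (List.range entities.length).foldl
        (fun relations j =>
          if i = j then relations
          else
            if PySem.Str.isIn (PySem.Str.lower (entities.getD i "")) lowered
                && PySem.Str.isIn (PySem.Str.lower (entities.getD j "")) lowered then
              relations ++ [(entities.getD i "", PySem.Str.strip p, entities.getD j "")]
            else relations) relations)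
      = (fun relations i => relations ++
          (if PySem.Str.isIn (PySem.Str.lower (entities.getD i "")) lowered then
            (((entities.eraseIdx i).filter (fun e => PySem.Str.isIn (PySem.Str.lower e) lowered)).map
              (fun b => (entities.getD i "", PySem.Str.strip p, b))) else [])) := by
    funext relations i
    have hstep : (fun (relations : List (String × String × String)) (j : Nat) =>
        if i = j then relations
        else
          if PySem.Str.isIn (PySem.Str.lower (entities.getD i "")) lowered
              && PySem.Str.isIn (PySem.Str.lower (entities.getD j "")) lowered then
            relations ++ [(entities.getD i "", PySem.Str.strip p, entities.getD j "")]
          else relations)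
        = (fun relations j =>
          if (!decide (i = j)
              && (PySem.Str.isIn (PySem.Str.lower (entities.getD i "")) lowered
                  && PySem.Str.isIn (PySem.Str.lower (entities.getD j "")) lowered)) then
            relations ++ [(entities.getD i "", PySem.Str.strip p, entities.getD j "")]
          else relations) := by
      funext relations j
      by_cases hij : i = j
      · subst hij; simp
      · simp [hij]
    rw [hstep, PySem.List.foldl_append_if]
    by_cases hqi : PySem.Str.isIn (PySem.Str.lower (entities.getD i "")) lowered
    · rw [if_pos hqi]
      rw [show (fun (j : Nat) => !decide (i = j)
            && (PySem.Str.isIn (PySem.Str.lower (entities.getD i "")) lowered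
                && PySem.Str.isIn (PySem.Str.lower (entities.getD j "")) lowered))
          = (fun j => !decide (i = j)
            && PySem.Str.isIn (PySem.Str.lower (entities.getD j "")) lowered) by
        funext j; rw [hqi]; simp]
      rw [pvInner (fun e => PySem.Str.isIn (PySem.Str.lower e) lowered)
        (fun b => (entities.getD i "", PySem.Str.strip p, b)) "" entities i]
    · rw [if_neg hqi]
      rw [show (fun (j : Nat) => !decide (i = j)
            && (PySem.Str.isIn (PySem.Str.lower (entities.getD i "")) lowered
                && PySem.Str.isIn (PySem.Str.lower (entities.getD j "")) lowered))
          = (fun _ => false) by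
        funext j
        simp only [Bool.not_eq_true] at hqi
        rw [hqi]; simp]
      simp
  rw [hfun2, PySem.List.foldl_append_eq_flatMap, List.nil_append]

-- B's loop over the filtered list reduced to the pvCore right-hand side
theorem pvBodyB_eq (present : List String) (rel : String) :
    (PySem.List.pyRange 0 (PySem.List.len present) 1).foldl (fun out k =>
      (PySem.List.slice present none (some k) ++ PySem.List.slice present (some (k + 1)) none).foldl
        (fun out b => out ++ [(PySem.List.pyGetD present k "", rel, b)]) out) []
    = (List.range present.length).flatMap
        (fun k => ((present.eraseIdx k).map (fun b => (present.getD k "", rel, b)))) := by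
  simp only [PySem.List.len_eq, PySem.List.pyRange_zero_natCast, List.foldl_map]
  have hfun : (fun (out : List (String × String × String)) (k : Nat) =>
      (PySem.List.slice present none (some (k : Int)) ++ PySem.List.slice present (some ((k : Int) + 1)) none).foldl
        (fun out b => out ++ [(PySem.List.pyGetD present (k : Int) "", rel, b)]) out)
      = (fun out k => out ++ ((present.eraseIdx k).map (fun b => (present.getD k "", rel, b)))) := by
    funext out k
    have hk1 : ((k : Int) + 1) = ((k + 1 : Nat) : Int) := by push_cast; ring
    rw [PySem.List.foldl_append_singleton_eq_map, PySem.List.pyGetD_natCast,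
      PySem.List.slice_to_natCast, hk1, PySem.List.slice_from_natCast,
      ← List.eraseIdx_eq_take_drop_succ]
  rw [hfun, PySem.List.foldl_append_eq_flatMap, List.nil_append]

-- ===== VERDICT (by name: the statement is the Claim_ definition above) =====
theorem extract_relations_fallback_py_spec : Claim_equal_extract_relations_fallback_py := by
  intro text entities _
  unfold Spec_extract_relations_fallback_py

  unfold extract_relations_fallback_py extract_relations_fallback_py_alt
  cases hfind : pvPredicates.find? (fun p => PySem.Str.isIn p (PySem.Str.lower text)) with
  | none =>
    simp only [pvPredLoop_eq_find, hfind]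
    split <;> rfl
  | some p =>
    simp only [pvPredLoop_eq_find, hfind]
    by_cases hent : entities = []
    · subst hent
      rw [if_pos rfl, pvBodyB_eq]
      simp
    · rw [if_neg hent, pvPairsA_eq, pvBodyB_eq,
        pvCore (fun e => PySem.Str.isIn (PySem.Str.lower e) (PySem.Str.lower text)) ""
          entities (fun a m => m.map (fun b => (a, PySem.Str.strip p, b)))]
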